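-- pv_equiv track=rewrite | github.com/lynn4343/neurow-brain-cloud | scripts/clean_data.py | dedup_by_text_per_month
-- ===== SOURCE A (Python) =====
-- def extract_month(ts_str: str) -> str:
--     """Extract YYYY-MM from ISO 8601 timestamp."""
--     return ts_str[:7]
--
-- def dedup_by_text_per_month(records: list) -> list:
--     """Dedup: max 1 per unique text per calendar month."""
--     seen = set()
--     kept = []
--     for r in sorted(records, key=lambda r: r["ts"]):
--         key = (r["text"], extract_month(r["ts"]))
--         if key not in seen:
--             seen.add(key)
--             kept.append(r)
--     return kept
-- ===== SOURCE B (Python) =====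
-- def dedup_by_text_per_month(records: list) -> list:
--     """Dedup: keep the earliest record per unique text per calendar month."""
--     best = {}
--     for i, r in enumerate(records):
--         key = (r["text"], r["ts"][:7])
--         if key not in best or r["ts"] < best[key][1]["ts"]:
--             best[key] = (i, r)
--     return [r for _, r in sorted(best.values(), key=lambda p: (p[1]["ts"], p[0]))]
-- ===== Notes on version B (the rewrite author's own statement) =====
-- stated objective: alternative
-- what changed: B replaces A's sort-all-records-then-first-wins-seen-set pass with a single pass keeping, in a dict keyed by (text, month), the earliest record per key (strict ts comparison, so first occurrence wins ties), then sorts only the surviving records by (ts, original index).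
import Mathlib
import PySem

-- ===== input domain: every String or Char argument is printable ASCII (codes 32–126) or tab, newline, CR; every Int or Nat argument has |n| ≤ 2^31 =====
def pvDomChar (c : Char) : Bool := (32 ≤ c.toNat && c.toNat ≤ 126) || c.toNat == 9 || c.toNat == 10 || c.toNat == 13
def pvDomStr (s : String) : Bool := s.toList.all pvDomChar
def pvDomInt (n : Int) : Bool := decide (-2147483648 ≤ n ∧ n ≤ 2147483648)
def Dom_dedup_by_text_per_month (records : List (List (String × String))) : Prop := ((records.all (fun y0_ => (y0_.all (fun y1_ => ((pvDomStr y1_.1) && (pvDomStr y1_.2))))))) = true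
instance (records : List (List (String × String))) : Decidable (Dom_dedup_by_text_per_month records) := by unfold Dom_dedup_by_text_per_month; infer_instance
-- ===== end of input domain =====

-- B replaces A's sort-all-then-first-wins seen-set pass with one pass keeping the earliest record
-- per (text, month) in a dict, then sorting only the survivors by (ts, original index) (alternative decomposition).

-- r[k] for the record dicts; exact (some value) whenever the key is present, which Pre_ guarantees
def pvGetS (r : List (String × String)) (k : String) : String :=
  ((PySem.Dict.mk r).get? k).getD ""

-- ===== PORT A =====
def extract_month (ts_str : String) : String :=
  PySem.Str.slice ts_str none (some 7)

def dedup_by_text_per_month (records : List (List (String × String))) : List (List (String × String)) :=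
  -- seen = set(); kept = []; for r in sorted(records, key=ts): if key not in seen: add, append
  ((PySem.List.sorted records (fun r => pvGetS r "ts") false).foldl
    (fun (st : PySem.Set (String × String) × List (List (String × String))) r =>
      let key := (pvGetS r "text", extract_month (pvGetS r "ts"))
      if st.1.contains key then st else (st.1.add key, st.2 ++ [r]))
    (PySem.Set.empty, [])).2

-- ===== PORT B =====
def pvKeyB (r : List (String × String)) : String × String :=
  (pvGetS r "text", extract_month (pvGetS r "ts"))

-- the loop body: if key not in best or r["ts"] < best[key][1]["ts"]: best[key] = (i, r)
def pvStep (d : PySem.Dict (String × String) (Int × List (String × String)))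
    (p : Int × List (String × String)) : PySem.Dict (String × String) (Int × List (String × String)) :=
  match d.get? (pvKeyB p.2) with
  | none => d.insert (pvKeyB p.2) p
  | some v => if pvGetS p.2 "ts" < pvGetS v.2 "ts" then d.insert (pvKeyB p.2) p else d

def dedup_by_text_per_month_alt (records : List (List (String × String))) : List (List (String × String)) :=
  let best := (PySem.List.enumerate records 0).foldl pvStep PySem.Dict.empty
  (PySem.List.sorted2 best.values (fun p => pvGetS p.2 "ts") (fun p => p.1) false).map (fun p => p.2)

-- ===== PRECONDITION & SPEC =====
-- Pre_: every record has both the "ts" and the "text" key; on a record missing either, the Python A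
-- (and B) raises KeyError.
def Pre_dedup_by_text_per_month (records : List (List (String × String))) : Prop :=
  (records.all (fun r => (PySem.Dict.mk r).contains "ts" && (PySem.Dict.mk r).contains "text")) = true
instance (records : List (List (String × String))) : Decidable (Pre_dedup_by_text_per_month records) := by
  unfold Pre_dedup_by_text_per_month; infer_instance

def pvWitness_dedup_by_text_per_month : (List (List (String × String))) :=
  [[("ts", "2021-01-03"), ("text", "a")], [("ts", "2021-01-02"), ("text", "a")],
   [("ts", "2021-02-05"), ("text", "a")], [("ts", "2021-01-02"), ("text", "b")]]

def Spec_dedup_by_text_per_month (records : List (List (String × String))) (out : List (List (String × String))) : Prop := out = dedup_by_text_per_month_alt records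
instance (records : List (List (String × String))) (out : List (List (String × String))) : Decidable (Spec_dedup_by_text_per_month records out) := by unfold Spec_dedup_by_text_per_month; infer_instance

-- ===== CLAIM (what is proved, stated in full; the proofs are below) =====
def Claim_equal_dedup_by_text_per_month : Prop := ∀ (records : List (List (String × String))), Dom_dedup_by_text_per_month records → Pre_dedup_by_text_per_month records → Spec_dedup_by_text_per_month records (dedup_by_text_per_month records)

-- ===== LEMMAS AND PROOFS =====

-- the lexicographic (ts, original index) sort key
def pvLexKey (p : Int × List (String × String)) : Lex (String × Int) :=
  toLex (pvGetS p.2 "ts", p.1)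

theorem pvLex_lt_iff (p q : Int × List (String × String)) :
    pvLexKey p < pvLexKey q ↔
      (pvGetS p.2 "ts" < pvGetS q.2 "ts" ∨ (pvGetS p.2 "ts" = pvGetS q.2 "ts" ∧ p.1 < q.1)) := by
  unfold pvLexKey
  exact Prod.Lex.toLex_lt_toLex

-- sorted2 with scalar keys k1, k2 is sorted with the lexicographic key
theorem pvSorted2_eq_sorted_lex {α : Type} (xs : List α) (k1 : α → String) (k2 : α → Int) :
    PySem.List.sorted2 xs k1 k2 false
      = PySem.List.sorted xs (fun a => toLex (k1 a, k2 a)) false := by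
  have hcmp : (fun (a b : α) => decide (k1 a < k1 b) || (!decide (k1 b < k1 a) && decide (k2 a < k2 b)))
      = (fun (a b : α) => decide ((fun c => toLex (k1 c, k2 c)) a < (fun c => toLex (k1 c, k2 c)) b)) := by
    funext a b
    rcases lt_trichotomy (k1 a) (k1 b) with h|h|h
    · simp [h, Prod.Lex.toLex_lt_toLex, lt_asymm h]
    · simp [h, Prod.Lex.toLex_lt_toLex]
    · simp [Prod.Lex.toLex_lt_toLex, lt_asymm h, (ne_of_gt h), h]
  show List.foldl (fun acc x => PySem.List.insertBy _ x acc) [] xs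
      = List.foldl (fun acc x => PySem.List.insertBy _ x acc) [] xs
  rw [hcmp]

theorem pvInsertBy_map {α β : Type} (before : α → α → Bool) (before' : β → β → Bool)
    (f : α → β) (x : α) (ys : List α) (h : ∀ y ∈ ys, before x y = before' (f x) (f y)) :
    (PySem.List.insertBy before x ys).map f = PySem.List.insertBy before' (f x) (ys.map f) := by
  induction ys with
  | nil => simp [PySem.List.insertBy]
  | cons y ys ih =>
    have h1 : before x y = before' (f x) (f y) := h y (List.mem_cons_self)
    have h2 : ∀ z ∈ ys, before x z = before' (f x) (f z) := fun z hz => h z (List.mem_cons_of_mem _ hz)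
    rw [show PySem.List.insertBy before x (y :: ys)
        = if before x y then x :: y :: ys else y :: PySem.List.insertBy before x ys from by
      simp [PySem.List.insertBy]]
    rw [List.map_cons,
      show PySem.List.insertBy before' (f x) (f y :: ys.map f)
        = if before' (f x) (f y) then f x :: f y :: ys.map f
          else f y :: PySem.List.insertBy before' (f x) (ys.map f) from by
      simp [PySem.List.insertBy]]
    rw [h1]
    split
    · simp
    · simp [ih h2]

-- stability: sorting the records by ts is the lexicographic (ts, index) sort of the enumerated records
theorem pvStab (l : List (List (String × String))) (i : Int) (acc : List (Int × List (String × String)))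
    (hacc : ∀ q ∈ acc, q.1 < i) :
    (((PySem.List.enumerate l i).foldl
        (fun acc p => PySem.List.insertBy (fun a b => decide (pvLexKey a < pvLexKey b)) p acc) acc).map (fun p => p.2))
      = l.foldl (fun acc r =>
          PySem.List.insertBy (fun a b => decide (pvGetS a "ts" < pvGetS b "ts")) r acc) (acc.map (fun p => p.2)) := by
  induction l generalizing i acc with
  | nil => simp [PySem.List.enumerate]
  | cons x t ih =>
    rw [show PySem.List.enumerate (x :: t) i = (i, x) :: PySem.List.enumerate t (i + 1) from by
      simp [PySem.List.enumerate]]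
    rw [List.foldl_cons, List.foldl_cons]
    have hmap : (PySem.List.insertBy (fun a b => decide (pvLexKey a < pvLexKey b)) (i, x) acc).map (fun p => p.2)
        = PySem.List.insertBy (fun a b => decide (pvGetS a "ts" < pvGetS b "ts")) x (acc.map (fun p => p.2)) := by
      apply pvInsertBy_map
      intro q hq
      have hqi : q.1 < i := hacc q hq
      have : pvLexKey (i, x) < pvLexKey q ↔ pvGetS x "ts" < pvGetS q.2 "ts" := by
        rw [pvLex_lt_iff]
        constructor
        · rintro (h | ⟨h1, h2⟩)
          · exact h
          · exact absurd h2 (by simp; omega)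
        · exact fun h => Or.inl h
      simp only [decide_eq_decide]
      exact this
    rw [← hmap]
    apply ih
    intro q hq
    rcases (PySem.List.mem_insertBy _ _ q acc).mp hq with h | h
    · subst h; omega
    · have := hacc q h; omega

theorem pvSortA_eq (records : List (List (String × String))) :
    PySem.List.sorted records (fun r => pvGetS r "ts") false
      = (PySem.List.sorted (PySem.List.enumerate records 0) pvLexKey false).map (fun p => p.2) := by
  rw [PySem.List.sorted_eq_foldl_insertBy, PySem.List.sorted_eq_foldl_insertBy]
  have h := pvStab records 0 [] (by simp)
  simpa using h.symm

-- the first-wins dedup loop, on the enumerated pairs, as structural recursion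
def pvDedup (s : PySem.Set (String × String)) : List (Int × List (String × String)) → List (Int × List (String × String))
  | [] => []
  | p :: t =>
      if s.contains (pvKeyB p.2) then pvDedup s t
      else p :: pvDedup (s.add (pvKeyB p.2)) t

theorem pvDedup_sublist (s : PySem.Set (String × String)) (l : List (Int × List (String × String))) :
    (pvDedup s l).Sublist l := by
  induction l generalizing s with
  | nil => simp [pvDedup]
  | cons p t ih =>
    rw [pvDedup]
    split
    · exact (ih s).cons p
    · exact (ih _).cons₂ p

theorem pvFoldA_eq (l : List (Int × List (String × String)))
    (s : PySem.Set (String × String)) (accR : List (List (String × String))) :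
    ((l.map (fun p => p.2)).foldl
      (fun (st : PySem.Set (String × String) × List (List (String × String))) r =>
        let key := (pvGetS r "text", extract_month (pvGetS r "ts"))
        if st.1.contains key then st else (st.1.add key, st.2 ++ [r])) (s, accR)).2
      = accR ++ (pvDedup s l).map (fun p => p.2) := by
  induction l generalizing s accR with
  | nil => simp [pvDedup]
  | cons p t ih =>
    rw [List.map_cons, List.foldl_cons, pvDedup]
    simp only []
    rw [show (pvGetS p.2 "text", extract_month (pvGetS p.2 "ts")) = pvKeyB p.2 from rfl]
    by_cases hc : s.contains (pvKeyB p.2) = true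
    · rw [if_pos hc, if_pos hc]
      exact ih s accR
    · rw [if_neg hc, if_neg hc]
      rw [ih _ (accR ++ [p.2])]
      simp

theorem pvMem_dedup (l : List (Int × List (String × String)))
    (hpw : l.Pairwise (fun p q => pvLexKey p < pvLexKey q)) :
    ∀ (s : PySem.Set (String × String)) (x : Int × List (String × String)),
      x ∈ pvDedup s l ↔
        x ∈ l ∧ s.contains (pvKeyB x.2) = false ∧
          ∀ q ∈ l, pvKeyB q.2 = pvKeyB x.2 → ¬ pvLexKey q < pvLexKey x := by
  induction l with
  | nil => simp [pvDedup]
  | cons p t ih =>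
    intro s x
    have hpq : ∀ q ∈ t, pvLexKey p < pvLexKey q := (List.pairwise_cons.mp hpw).1
    have hpw' : t.Pairwise (fun p q => pvLexKey p < pvLexKey q) := (List.pairwise_cons.mp hpw).2
    rw [pvDedup]
    by_cases hc : s.contains (pvKeyB p.2) = true
    · rw [if_pos hc]
      rw [ih hpw' s x]
      constructor
      · rintro ⟨hx, hs, hmin⟩
        refine ⟨List.mem_cons_of_mem _ hx, hs, ?_⟩
        intro q hq hk
        rcases List.mem_cons.mp hq with rfl | hq
        · intro _
          rw [hk] at hc
          rw [hc] at hs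
          exact absurd hs (by simp)
        · exact hmin q hq hk
      · rintro ⟨hx, hs, hmin⟩
        rcases List.mem_cons.mp hx with rfl | hx
        · rw [hc] at hs
          exact absurd hs (by simp)
        · exact ⟨hx, hs, fun q hq hk => hmin q (List.mem_cons_of_mem _ hq) hk⟩
    · rw [if_neg hc]
      have hcf : s.contains (pvKeyB p.2) = false := by
        cases h : s.contains (pvKeyB p.2) <;> simp_all
      have hnotmem : pvKeyB p.2 ∉ s := by
        simpa [PySem.Set.contains] using hcf
      constructor
      · intro hx
        rcases List.mem_cons.mp hx with rfl | hx
        · refine ⟨List.mem_cons_self, hcf, ?_⟩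
          intro q hq hk
          rcases List.mem_cons.mp hq with rfl | hq
          · exact lt_irrefl _
          · exact lt_asymm (hpq q hq)
        · obtain ⟨hxt, hxs, hmin⟩ := (ih hpw' _ x).mp hx
          have hxadd : pvKeyB x.2 ∉ PySem.Set.add s (pvKeyB p.2) := by
            simpa [PySem.Set.contains] using hxs
          have hxns : pvKeyB x.2 ∉ s := fun h => hxadd ((PySem.Set.mem_add _ _ _).mpr (Or.inl h))
          have hxne : pvKeyB x.2 ≠ pvKeyB p.2 := fun h => hxadd ((PySem.Set.mem_add _ _ _).mpr (Or.inr h))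
          refine ⟨List.mem_cons_of_mem _ hxt, ?_, ?_⟩
          · simpa [PySem.Set.contains] using hxns
          · intro q hq hk
            rcases List.mem_cons.mp hq with rfl | hq
            · exact fun _ => hxne hk.symm
            · exact hmin q hq hk
      · rintro ⟨hx, hs, hmin⟩
        rcases List.mem_cons.mp hx with rfl | hx
        · exact List.mem_cons_self
        · have hkne : pvKeyB p.2 ≠ pvKeyB x.2 := by
            intro hk
            exact hmin p List.mem_cons_self hk (hpq x hx)
          have hxns : pvKeyB x.2 ∉ s := by
            simpa [PySem.Set.contains] using hs
          have hxadd : pvKeyB x.2 ∉ PySem.Set.add s (pvKeyB p.2) := by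
            intro h
            rcases (PySem.Set.mem_add _ _ _).mp h with h | h
            · exact hxns h
            · exact hkne h.symm
          refine List.mem_cons_of_mem _ ((ih hpw' _ x).mpr ⟨hx, ?_, ?_⟩)
          · simpa [PySem.Set.contains] using hxadd
          · exact fun q hq hk => hmin q (List.mem_cons_of_mem _ hq) hk

-- ============ B-side: the running-minimum dict ============

def pvPick (v p : Int × List (String × String)) : Int × List (String × String) :=
  if pvGetS p.2 "ts" < pvGetS v.2 "ts" then p else v

-- the lookup a pvStep-fold produces at key k, as a pure running minimum over the key's class
def pvMin1 : Option (Int × List (String × String)) → List (Int × List (String × String)) → Option (Int × List (String × String))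
  | o, [] => o
  | none, p :: t => pvMin1 (some p) t
  | some v, p :: t => pvMin1 (some (pvPick v p)) t

theorem pvMin1_some (v : Int × List (String × String)) (l : List (Int × List (String × String))) :
    pvMin1 (some v) l = some (l.foldl pvPick v) := by
  induction l generalizing v with
  | nil => rfl
  | cons p t ih => rw [pvMin1, List.foldl_cons, ih]

theorem pvBest_get (l : List (Int × List (String × String)))
    (d : PySem.Dict (String × String) (Int × List (String × String))) (k : String × String) :
    (l.foldl pvStep d).get? k = pvMin1 (d.get? k) (l.filter (fun p => pvKeyB p.2 == k)) := by
  induction l generalizing d with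
  | nil => rfl
  | cons p t ih =>
    rw [List.foldl_cons, ih, List.filter_cons]
    by_cases hk : pvKeyB p.2 = k
    · rw [if_pos (by simp [hk])]
      have hstep : (pvStep d p).get? k
          = match d.get? k with
            | none => some p
            | some v => some (pvPick v p) := by
        unfold pvStep
        rw [hk]
        cases hd : d.get? k with
        | none => simp [PySem.Dict.get?_insert_self]
        | some v =>
          unfold pvPick
          dsimp only
          by_cases hts : pvGetS p.2 "ts" < pvGetS v.2 "ts"
          · rw [if_pos hts, if_pos hts, PySem.Dict.get?_insert_self]
          · rw [if_neg hts, if_neg hts]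
            exact hd
      rw [hstep]
      cases d.get? k with
      | none => rw [pvMin1]
      | some v => rw [pvMin1]
    · rw [if_neg (by simp [hk])]
      have hstep : (pvStep d p).get? k = d.get? k := by
        unfold pvStep
        cases hd : d.get? (pvKeyB p.2) with
        | none => exact PySem.Dict.get?_insert_of_ne d p (fun h => hk h.symm)
        | some v =>
          dsimp only
          by_cases hts : pvGetS p.2 "ts" < pvGetS v.2 "ts"
          · rw [if_pos hts]
            exact PySem.Dict.get?_insert_of_ne d p (fun h => hk h.symm)
          · rw [if_neg hts]
      rw [hstep]

theorem pvFoldPick_mem (v : Int × List (String × String)) (l : List (Int × List (String × String))) :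
    l.foldl pvPick v ∈ v :: l := by
  induction l generalizing v with
  | nil => simp
  | cons p t ih =>
    rw [List.foldl_cons]
    rcases List.mem_cons.mp (ih (pvPick v p)) with h | h
    · rw [h]
      unfold pvPick
      split
      · simp
      · simp
    · simp [h]

theorem pvFoldPick_min (l : List (Int × List (String × String))) :
    ∀ (v : Int × List (String × String)), (v :: l).Pairwise (fun p q => p.1 < q.1) →
      ∀ q ∈ v :: l, ¬ pvLexKey q < pvLexKey (l.foldl pvPick v) := by
  induction l with
  | nil =>
    intro v _ q hq
    rw [List.mem_singleton.mp hq]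
    simp
  | cons p t ih =>
    intro v hpw q hq
    have hvp : v.1 < p.1 := (List.pairwise_cons.mp hpw).1 p List.mem_cons_self
    have hv : ∀ q ∈ t, v.1 < q.1 := fun q hq =>
      (List.pairwise_cons.mp hpw).1 q (List.mem_cons_of_mem _ hq)
    have hp : ∀ q ∈ t, p.1 < q.1 :=
      (List.pairwise_cons.mp (List.pairwise_cons.mp hpw).2).1
    have ht : t.Pairwise (fun p q => p.1 < q.1) :=
      (List.pairwise_cons.mp (List.pairwise_cons.mp hpw).2).2
    have hpw' : (pvPick v p :: t).Pairwise (fun p q => p.1 < q.1) := by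
      refine List.pairwise_cons.mpr ⟨?_, ht⟩
      unfold pvPick
      by_cases hts : pvGetS p.2 "ts" < pvGetS v.2 "ts"
      · rw [if_pos hts]
        exact hp
      · rw [if_neg hts]
        exact hv
    have hle : pvLexKey (pvPick v p) ≤ pvLexKey v ∧ pvLexKey (pvPick v p) ≤ pvLexKey p := by
      unfold pvPick
      by_cases hts : pvGetS p.2 "ts" < pvGetS v.2 "ts"
      · rw [if_pos hts]
        refine ⟨le_of_lt ?_, le_refl _⟩
        rw [pvLex_lt_iff]
        exact Or.inl hts
      · rw [if_neg hts]
        refine ⟨le_refl _, le_of_lt ?_⟩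
        rw [pvLex_lt_iff]
        rcases lt_or_eq_of_le (not_lt.mp hts) with h | h
        · exact Or.inl h
        · exact Or.inr ⟨h, hvp⟩
    rw [List.foldl_cons]
    rcases List.mem_cons.mp hq with hqv | hq
    · intro hlt
      exact ih (pvPick v p) hpw' (pvPick v p) List.mem_cons_self
        (lt_of_le_of_lt hle.1 (hqv ▸ hlt))
    rcases List.mem_cons.mp hq with hqp | hq
    · intro hlt
      exact ih (pvPick v p) hpw' (pvPick v p) List.mem_cons_self
        (lt_of_le_of_lt hle.2 (hqp ▸ hlt))
    · exact ih (pvPick v p) hpw' q (List.mem_cons_of_mem _ hq)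

-- what a lookup in the final dict means: the (ts, index)-minimal element of the key's class
theorem pvF_get_spec (E : List (Int × List (String × String)))
    (hE : E.Pairwise (fun p q => p.1 < q.1)) (k : String × String) (x : Int × List (String × String))
    (h : (E.foldl pvStep PySem.Dict.empty).get? k = some x) :
    x ∈ E ∧ pvKeyB x.2 = k ∧ ∀ q ∈ E, pvKeyB q.2 = k → ¬ pvLexKey q < pvLexKey x := by
  rw [pvBest_get, PySem.Dict.get?_empty] at h
  set C := E.filter (fun p => pvKeyB p.2 == k) with hC
  have hCsub : C.Sublist E := List.filter_sublist
  have hCpw : C.Pairwise (fun p q => p.1 < q.1) := hE.sublist hCsub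
  have hCmem : ∀ q ∈ C, pvKeyB q.2 = k := by
    intro q hq
    have := (List.mem_filter.mp hq).2
    simpa using this
  cases hCe : C with
  | nil => rw [hCe] at h; exact absurd h (by simp [pvMin1])
  | cons c ct =>
    rw [hCe, pvMin1, pvMin1_some] at h
    have hx : x = ct.foldl pvPick c := by
      exact (Option.some_injective _ h).symm
    have hmemC : x ∈ C := by
      rw [hCe, hx]; exact pvFoldPick_mem c ct
    refine ⟨hCsub.mem hmemC, hCmem x hmemC, ?_⟩
    intro q hq hk
    have hqC : q ∈ C := List.mem_filter.mpr ⟨hq, by simpa using hk⟩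
    rw [hx]
    exact pvFoldPick_min ct c (hCe ▸ hCpw) q (hCe ▸ hqC)

theorem pvF_get_of_mem (E : List (Int × List (String × String)))
    (x : Int × List (String × String)) (hx : x ∈ E) :
    ∃ m, (E.foldl pvStep PySem.Dict.empty).get? (pvKeyB x.2) = some m := by
  rw [pvBest_get, PySem.Dict.get?_empty]
  have hxC : x ∈ E.filter (fun p => pvKeyB p.2 == pvKeyB x.2) :=
    List.mem_filter.mpr ⟨hx, by simp⟩
  cases hCe : E.filter (fun p => pvKeyB p.2 == pvKeyB x.2) with
  | nil => rw [hCe] at hxC; exact absurd hxC (by simp)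
  | cons c ct => rw [pvMin1, pvMin1_some]; exact ⟨_, rfl⟩

-- ===== VERDICT (by name: the statement is the Claim_ definition above) =====
theorem dedup_by_text_per_month_spec : Claim_equal_dedup_by_text_per_month := by
  unfold Claim_equal_dedup_by_text_per_month Spec_dedup_by_text_per_month
  intro records _ _
  unfold dedup_by_text_per_month dedup_by_text_per_month_alt
  simp only []
  set E := PySem.List.enumerate records 0 with hE
  set T := PySem.List.sorted E pvLexKey false with hT
  set F := E.foldl pvStep PySem.Dict.empty with hF
  -- A's side: sort is the lexicographic sort of the enumerated list, dedup loop is pvDedup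
  rw [pvSortA_eq]
  rw [pvFoldA_eq T PySem.Set.empty []]
  rw [List.nil_append]
  -- B's side: sorted2 is the lexicographic sort
  rw [pvSorted2_eq_sorted_lex]
  have hkey : (fun (a : Int × List (String × String)) => toLex (pvGetS a.2 "ts", a.1)) = pvLexKey := rfl
  rw [hkey]
  -- facts about E and T
  have hEfst : E.Pairwise (fun p q => p.1 < q.1) := PySem.List.pairwise_lt_enumerate records 0
  have hE_ne : E.Pairwise (fun p q => p.1 ≠ q.1) := hEfst.imp (fun h => ne_of_lt h)
  have hpermTE : T.Perm E := PySem.List.sorted_perm E pvLexKey false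
  have hT_ne : T.Pairwise (fun p q => p.1 ≠ q.1) :=
    (List.Perm.pairwise_iff (fun h => h.symm) hpermTE).mpr hE_ne
  have hT_le : T.Pairwise (fun p q => pvLexKey p ≤ pvLexKey q) := PySem.List.sorted_pairwise E pvLexKey
  have hT_lt : T.Pairwise (fun p q => pvLexKey p < pvLexKey q) := by
    refine (hT_le.and hT_ne).imp ?_
    rintro a b ⟨h1, h2⟩
    refine lt_of_le_of_ne h1 (fun heq => h2 ?_)
    have := congrArg (fun k => (ofLex k).2) heq
    simpa [pvLexKey] using this
  have hE_nodup : E.Nodup := hE_ne.imp (fun h => by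
    intro heq; exact h (congrArg Prod.fst heq))
  have hT_nodup : T.Nodup := (List.Perm.nodup_iff hpermTE).mpr hE_nodup
  have hD_nodup : (pvDedup PySem.Set.empty T).Nodup := (pvDedup_sublist _ _).nodup hT_nodup
  have hD_lt : (pvDedup PySem.Set.empty T).Pairwise (fun p q => pvLexKey p < pvLexKey q) :=
    hT_lt.sublist (pvDedup_sublist _ _)
  have hTmem : ∀ b : Int × List (String × String), b ∈ T ↔ b ∈ E := fun b =>
    PySem.List.mem_sorted E pvLexKey false b
  -- lexKey is injective on E (indices are distinct)
  have hE_forall_ne : ∀ a ∈ E, ∀ b ∈ E, a ≠ b → a.1 ≠ b.1 :=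
    fun a ha b hb hab => List.Pairwise.forall (fun _ _ h => Ne.symm h) hE_ne ha hb hab
  have hLexInj : ∀ a ∈ E, ∀ b ∈ E, pvLexKey a = pvLexKey b → a = b := by
    intro a ha b hb hab
    by_contra hne
    exact hE_forall_ne a ha b hb hne (by
      have := congrArg (fun k => (ofLex k).2) hab
      simpa [pvLexKey] using this)
  -- membership in the dict's values = the minimality condition = membership in pvDedup T
  have hkeys_nodup : F.keys.Nodup := by
    rw [hF]
    have : ∀ (l : List (Int × List (String × String)))
        (d : PySem.Dict (String × String) (Int × List (String × String))),
        d.keys.Nodup → (l.foldl pvStep d).keys.Nodup := by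
      intro l
      induction l with
      | nil => intro d hd; exact hd
      | cons p t ih =>
        intro d hd
        rw [List.foldl_cons]
        refine ih _ ?_
        unfold pvStep
        cases d.get? (pvKeyB p.2) with
        | none => exact PySem.Dict.nodup_keys_insert _ _ _ hd
        | some v =>
          dsimp only
          by_cases hts : pvGetS p.2 "ts" < pvGetS v.2 "ts"
          · rw [if_pos hts]
            exact PySem.Dict.nodup_keys_insert _ _ _ hd
          · rw [if_neg hts]
            exact hd
    exact this E PySem.Dict.empty (PySem.Dict.nodup_keys_empty)
  have hvals : ∀ x, x ∈ F.values ↔ x ∈ pvDedup PySem.Set.empty T := by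
    intro x
    have hcont : (PySem.Set.empty : PySem.Set (String × String)).contains (pvKeyB x.2) = false := by
      simp [PySem.Set.empty, PySem.Set.contains]
    rw [pvMem_dedup T hT_lt PySem.Set.empty x]
    simp only [hcont, true_and, hTmem]
    constructor
    · intro hxv
      have hxv' : x ∈ F.items.map (fun p => p.2) := hxv
      obtain ⟨⟨k, y⟩, hmem, hy⟩ := List.mem_map.mp hxv'
      simp only at hy
      subst hy
      have hget : F.get? k = some y := PySem.Dict.get?_of_mem_items F hmem hkeys_nodup
      obtain ⟨hxE, hkk, hmin⟩ := pvF_get_spec E hEfst k y hget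
      exact ⟨hxE, by rw [hkk]; exact hmin⟩
    · rintro ⟨hxE, hmin⟩
      obtain ⟨m, hm⟩ := pvF_get_of_mem E x hxE
      obtain ⟨hmE, hmk, hmmin⟩ := pvF_get_spec E hEfst _ m hm
      have hxm : x = m := by
        apply hLexInj x hxE m hmE
        have h1 : ¬ pvLexKey x < pvLexKey m := hmmin x hxE rfl
        have h2 : ¬ pvLexKey m < pvLexKey x := hmin m hmE hmk
        exact le_antisymm (not_lt.mp h2) (not_lt.mp h1)
      rw [hxm] at hm ⊢
      show m ∈ F.items.map (fun p => p.2)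
      exact List.mem_map.mpr ⟨(pvKeyB m.2, m), PySem.Dict.mem_items_of_get?_eq_some F hm, rfl⟩
  have hvals_nodup : F.values.Nodup := by
    have hitems_nodup : F.items.Nodup :=
      List.Nodup.of_map _ (show (F.items.map (fun p => p.1)).Nodup from hkeys_nodup)
    refine List.Nodup.map_on ?_ hitems_nodup
    rintro ⟨k1, v1⟩ h1 ⟨k2, v2⟩ h2 hv
    simp only at hv
    subst hv
    have g1 : F.get? k1 = some v1 := PySem.Dict.get?_of_mem_items F h1 hkeys_nodup
    have g2 : F.get? k2 = some v1 := PySem.Dict.get?_of_mem_items F h2 hkeys_nodup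
    have k1e := (pvF_get_spec E hEfst k1 v1 g1).2.1
    have k2e := (pvF_get_spec E hEfst k2 v1 g2).2.1
    rw [← k1e, k2e]
  have hperm : F.values.Perm (pvDedup PySem.Set.empty T) :=
    (List.perm_ext_iff_of_nodup hvals_nodup hD_nodup).mpr hvals
  rw [PySem.List.sorted_eq_of_perm_of_pairwise_lt F.values (pvDedup PySem.Set.empty T) pvLexKey hperm.symm hD_lt]
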